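-- pv_equiv track=rewrite | github.com/CodingPerson/OWET_code | dataProcess/data2std.py | getFewNerdLabel
-- ===== SOURCE A (Python) =====
-- def getFewNerdLabel(label):
--     labels = label.split('-')
--     tmp = labels[0]
--     labels_list = [tmp]
--     for i in range(1, len(labels)):
--         tmp += f'-{labels[i]}'
--         labels_list.append(tmp)
--     return labels_list
-- ===== SOURCE B (Python) =====
-- def getFewNerdLabel(label):
--     labels = label.split('-')
--     return ['-'.join(labels[:i]) for i in range(1, len(labels) + 1)]
-- ===== Notes on version B (the rewrite author's own statement) =====
-- stated objective: simpler
-- what changed: Replaces the running string accumulator and incremental append loop by a comprehension that builds each prefix independently as a slice-and-join of the split parts.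
import Mathlib
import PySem

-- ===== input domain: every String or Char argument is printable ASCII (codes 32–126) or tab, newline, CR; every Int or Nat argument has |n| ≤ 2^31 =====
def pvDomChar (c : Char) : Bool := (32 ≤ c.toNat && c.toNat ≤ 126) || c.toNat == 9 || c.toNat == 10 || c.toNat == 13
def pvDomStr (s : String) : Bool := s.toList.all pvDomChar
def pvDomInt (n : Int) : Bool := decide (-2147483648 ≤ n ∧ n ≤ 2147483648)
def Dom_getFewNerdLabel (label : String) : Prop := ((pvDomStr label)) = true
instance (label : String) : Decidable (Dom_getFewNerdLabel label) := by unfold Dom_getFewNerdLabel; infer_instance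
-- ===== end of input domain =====

-- B replaces A's running string accumulator by a comprehension joining each prefix slice independently (objective: simpler).

-- ===== PORT A =====
def getFewNerdLabel (label : String) : List String :=
  let labels := (PySem.Str.split? label "-").getD []   -- sep "-" is nonempty, so split? is always `some`
  let tmp := PySem.List.pyGetD labels 0 ""             -- labels[0]; split('-') never yields an empty list, so in range
  ((PySem.List.pyRange 1 (labels.length : Int)).foldl
      (fun (st : String × List String) i =>
        let tmp := st.1 ++ "-" ++ PySem.List.pyGetD labels i ""
        (tmp, st.2 ++ [tmp]))
      (tmp, [tmp])).2

-- ===== PORT B =====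
def getFewNerdLabel_alt (label : String) : List String :=
  let labels := (PySem.Str.split? label "-").getD []   -- sep "-" is nonempty, so split? is always `some`
  (PySem.List.pyRange 1 ((labels.length : Int) + 1)).map
    (fun i => PySem.Str.join "-" (PySem.List.slice labels none (some i)))

-- ===== PRECONDITION & SPEC =====
def Spec_getFewNerdLabel (label : String) (out : List String) : Prop := out = getFewNerdLabel_alt label
instance (label : String) (out : List String) : Decidable (Spec_getFewNerdLabel label out) := by unfold Spec_getFewNerdLabel; infer_instance

-- ===== CLAIM (what is proved, stated in full; the proofs are below) =====
def Claim_equal_getFewNerdLabel : Prop := ∀ (label : String), Dom_getFewNerdLabel label → Spec_getFewNerdLabel label (getFewNerdLabel label)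

-- ===== LEMMAS AND PROOFS =====

-- split('-') never returns an empty list of parts
theorem splitOn_go_ne_nil (sep : List Char) (fuel : Nat) (l cur : List Char)
    (acc : List (List Char)) : PySem.Chars.splitOn.go sep fuel l cur acc ≠ [] := by
  induction fuel generalizing l cur acc with
  | zero => simp [PySem.Chars.splitOn.go]
  | succ fuel ih =>
    cases l with
    | nil => simp [PySem.Chars.splitOn.go]
    | cons c rest =>
      rw [PySem.Chars.splitOn.go]
      split
      · exact ih _ _ _
      · exact ih _ _ _

theorem splitOn_ne_nil (s sep : List Char) : PySem.Chars.splitOn s sep ≠ [] := by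
  unfold PySem.Chars.splitOn; exact splitOn_go_ne_nil _ _ _ _ _

-- the hyphen-joined prefix of length k
def J (ls : List String) (k : Nat) : String := PySem.Str.join "-" (ls.take k)

theorem chars_join_append_singleton (sep y : List Char) (xs : List (List Char)) (h : xs ≠ []) :
    PySem.Chars.join sep (xs ++ [y]) = PySem.Chars.join sep xs ++ sep ++ y := by
  induction xs with
  | nil => exact absurd rfl h
  | cons a t ih =>
    cases t with
    | nil => simp [PySem.Chars.join_cons_cons, PySem.Chars.join_singleton]
    | cons b u =>
      simp only [List.cons_append, PySem.Chars.join_cons_cons]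
      rw [← List.cons_append, ih (by simp)]
      simp

theorem J_succ (ls : List String) (k : Nat) (h1 : 1 ≤ k) (hk : k < ls.length) :
    J ls (k + 1) = J ls k ++ "-" ++ PySem.List.pyGetD ls (k : Int) "" := by
  apply String.toList_inj.mp
  have htake : ls.take (k + 1) = ls.take k ++ [ls[k]] := by
    rw [List.take_add_one, List.getElem?_eq_getElem hk]; rfl
  rw [PySem.List.pyGetD_natCast, List.getD_eq_getElem ls "" hk]
  simp only [String.toList_append, J, PySem.Str.toList_join, htake, List.map_append,
    List.map_cons, List.map_nil]
  rw [chars_join_append_singleton _ _ _ (by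
    intro hcontra
    have : (ls.take k).length = 0 := by
      simpa using congrArg List.length hcontra
    simp [Nat.min_eq_left (le_of_lt hk)] at this
    omega)]

-- A's loop, run up to n, produces exactly the first n joined prefixes
theorem loopA (ls : List String) (n : Nat) (h1 : 1 ≤ n) (hn : n ≤ ls.length) :
    (PySem.List.pyRange 1 (n : Int)).foldl
      (fun (st : String × List String) i =>
        let tmp := st.1 ++ "-" ++ PySem.List.pyGetD ls i ""
        (tmp, st.2 ++ [tmp]))
      (J ls 1, [J ls 1])
    = (J ls n, (List.range n).map (fun k => J ls (k + 1))) := by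
  induction n with
  | zero => omega
  | succ m ih =>
    by_cases hm : m = 0
    · subst hm
      rw [show (((0 + 1 : Nat)) : Int) = 1 by norm_num,
        show PySem.List.pyRange 1 (1 : Int) = [] from by decide]
      simp [List.range_succ]
    · have h1m : 1 ≤ m := by omega
      have : ((m : Int) + 1) = (((m : Nat) + 1 : Nat) : Int) := by push_cast; ring
      rw [show ((m + 1 : Nat) : Int) = (m : Int) + 1 by push_cast; ring,
        PySem.List.pyRange_one_succ_right (by exact_mod_cast h1m), List.foldl_append,
        ih h1m (by omega)]
      simp only [List.foldl_cons, List.foldl_nil, List.range_succ, List.map_append, List.map_cons,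
        List.map_nil]
      rw [← J_succ ls m h1m (by omega)]

-- B's comprehension produces the same list of joined prefixes
theorem mapB (ls : List String) (n : Nat) :
    (PySem.List.pyRange 1 ((n : Int) + 1)).map
      (fun i => PySem.Str.join "-" (PySem.List.slice ls none (some i)))
    = (List.range n).map (fun k => J ls (k + 1)) := by
  induction n with
  | zero =>
    rw [show (((0 : Nat)) : Int) + 1 = 1 by norm_num,
      show PySem.List.pyRange 1 (1 : Int) = [] from by decide]
    simp
  | succ m ih =>
    rw [show ((m + 1 : Nat) : Int) + 1 = ((m : Int) + 1) + 1 by push_cast; ring,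
      PySem.List.pyRange_one_succ_right (by omega), List.map_append, ih, List.range_succ,
      List.map_append]
    simp only [List.map_cons, List.map_nil]
    rw [show ((m : Int) + 1) = (((m + 1 : Nat)) : Int) by push_cast; ring,
      PySem.List.slice_to_natCast]
    rfl

theorem J_one (x : String) (t : List String) : J (x :: t) 1 = x := by
  apply String.toList_inj.mp
  simp [J, PySem.Str.toList_join, PySem.Chars.join_singleton]

-- ===== VERDICT (by name: the statement is the Claim_ definition above) =====
theorem getFewNerdLabel_spec : Claim_equal_getFewNerdLabel := by
  intro label _
  unfold Spec_getFewNerdLabel getFewNerdLabel getFewNerdLabel_alt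
  have hsplit : (PySem.Str.split? label "-").getD []
      = (PySem.Chars.splitOn label.toList ['-']).map String.ofList := by
    simp [PySem.Str.split?, PySem.Chars.split?]
  rw [hsplit]
  dsimp only
  set ls := (PySem.Chars.splitOn label.toList ['-']).map String.ofList with hls
  have hne : ls ≠ [] := by
    simp only [hls, ne_eq, List.map_eq_nil_iff]
    exact splitOn_ne_nil _ _
  obtain ⟨x, t, hxt⟩ := List.exists_cons_of_ne_nil hne
  have hlen : 1 ≤ ls.length := by rw [hxt]; simp
  have h0 : PySem.List.pyGetD ls 0 "" = J ls 1 := by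
    rw [hxt, show (0 : Int) = ((0 : Nat) : Int) by rfl, PySem.List.pyGetD_natCast, J_one]
    rfl
  rw [h0, loopA ls ls.length hlen le_rfl, mapB ls ls.length]
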